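-- pv_equiv track=rewrite | github.com/globalize9/mfe2020 | tempTestScript.py | lessereq
-- ===== SOURCE A (Python) =====
-- def lessereq (arr, x):
--     counter = 0
--     for i in arr:
--         if i <= x:
--             counter += 1
--
--     if (counter == len(arr)):
--         return (1)
--     else:
--         return (0)
-- ===== SOURCE B (Python) =====
-- def lessereq(arr, x):
--     if not arr:
--         return 1
--     return 1 if max(arr) <= x else 0
-- ===== Notes on version B (the rewrite author's own statement) =====
-- stated objective: simpler
-- what changed: Replaces the counting loop plus count-vs-length comparison with a single max-reduction and one comparison (empty list returns 1 directly).
import Mathlib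
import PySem

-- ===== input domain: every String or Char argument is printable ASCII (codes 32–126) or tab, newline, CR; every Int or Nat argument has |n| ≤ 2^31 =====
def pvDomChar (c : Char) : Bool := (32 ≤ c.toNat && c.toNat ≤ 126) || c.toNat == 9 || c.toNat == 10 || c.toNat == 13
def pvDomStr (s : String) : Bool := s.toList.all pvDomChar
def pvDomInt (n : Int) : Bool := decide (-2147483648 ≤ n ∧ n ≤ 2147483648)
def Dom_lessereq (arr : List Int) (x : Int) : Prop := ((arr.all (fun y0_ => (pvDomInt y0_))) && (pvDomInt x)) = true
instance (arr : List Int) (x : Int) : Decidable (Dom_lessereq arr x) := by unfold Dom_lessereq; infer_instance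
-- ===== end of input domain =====

-- B replaces A's counting loop + count-vs-length comparison with a max-reduction and one comparison (objective: simpler).


-- ===== PORT A =====
def lessereq (arr : List Int) (x : Int) : Int :=
  let counter := arr.foldl (fun counter i => if i ≤ x then counter + 1 else counter) 0
  if counter = (arr.length : Int) then 1 else 0

-- ===== PORT B =====
def lessereq_alt (arr : List Int) (x : Int) : Int :=
  if arr = [] then 1
  else match PySem.List.max? arr (fun y => y) with
       | some m => if m ≤ x then 1 else 0
       | none => 0   -- unreachable: arr ≠ []

-- ===== PRECONDITION & SPEC =====
def Spec_lessereq (arr : List Int) (x : Int) (out : Int) : Prop := out = lessereq_alt arr x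
instance (arr : List Int) (x : Int) (out : Int) : Decidable (Spec_lessereq arr x out) := by unfold Spec_lessereq; infer_instance

-- ===== CLAIM (what is proved, stated in full; the proofs are below) =====
def Claim_equal_lessereq : Prop := ∀ (arr : List Int) (x : Int), Dom_lessereq arr x → Spec_lessereq arr x (lessereq arr x)

-- ===== LEMMAS AND PROOFS =====

-- A's counter equals the count of elements ≤ x, and is at most the length; it equals
-- the length iff every element is ≤ x, which is also what B's max-comparison decides.
lemma counter_eq_countP (arr : List Int) (x : Int) :
    arr.foldl (fun counter i => if i ≤ x then counter + 1 else counter) 0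
      = (arr.countP (fun i => decide (i ≤ x)) : Int) := by
  suffices h : ∀ c : Int, arr.foldl (fun counter i => if i ≤ x then counter + 1 else counter) c
      = c + (arr.countP (fun i => decide (i ≤ x)) : Int) by
    simpa using h 0
  induction arr with
  | nil => intro c; simp
  | cons a t ih =>
    intro c
    by_cases h : a ≤ x <;> simp [h, ih, add_assoc, add_comm]

lemma lessereq_eq_all (arr : List Int) (x : Int) :
    lessereq arr x = if arr.all (fun i => decide (i ≤ x)) then 1 else 0 := by
  unfold lessereq
  rw [counter_eq_countP]
  have key : (arr.countP (fun i => decide (i ≤ x)) = arr.length)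
      ↔ arr.all (fun i => decide (i ≤ x)) = true := by
    rw [List.countP_eq_length, List.all_eq_true]
  rcases h : arr.all (fun i => decide (i ≤ x)) with _ | _
  · have hne : arr.countP (fun i => decide (i ≤ x)) ≠ arr.length := fun hc => by
      simp [key.mp hc] at h
    have : ((arr.countP (fun i => decide (i ≤ x)) : Int) ≠ (arr.length : Int)) := by
      exact_mod_cast hne
    simp [this]
  · have : arr.countP (fun i => decide (i ≤ x)) = arr.length := key.mpr h
    simp [this]

-- B's value is also decided by "all elements ≤ x" (via max?_isMax / max?_mem).
lemma lessereq_alt_eq_all (arr : List Int) (x : Int) :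
    lessereq_alt arr x = if arr.all (fun i => decide (i ≤ x)) then 1 else 0 := by
  unfold lessereq_alt
  rcases arr with _ | ⟨a, t⟩
  · simp
  · rw [if_neg (by simp)]
    rcases hm : PySem.List.max? (a :: t) (fun y => y) with _ | m
    · exact absurd (((PySem.List.max?_eq_none_iff _ _).mp hm)) (by simp)
    · by_cases hx : m ≤ x
      · have hall : (a :: t).all (fun i => decide (i ≤ x)) = true := by
        -- every element ≤ m ≤ x
          rw [List.all_eq_true]
          intro i hi
          have := PySem.List.max?_isMax hm i hi
          simp only [decide_eq_true_eq]
          exact le_trans this hx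
        simp [hx, hall]
      · have hmem : m ∈ (a :: t) := PySem.List.max?_mem hm
        have : ¬ ((a :: t).all (fun i => decide (i ≤ x)) = true) := by
          rw [List.all_eq_true]
          intro hall
          exact hx (by simpa using hall m hmem)
        simp [hx, this]

-- ===== VERDICT (by name: the statement is the Claim_ definition above) =====
theorem lessereq_spec : Claim_equal_lessereq := by
  intro arr x _
  unfold Spec_lessereq
  rw [lessereq_eq_all, lessereq_alt_eq_all]
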